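-- pv_equiv track=rewrite | github.com/rohitsanam/leap-india- | leap_dep_bp16.py | clean_customer_name
-- ===== SOURCE A (Python) =====
-- def clean_customer_name(text):
--     specified_words = ['Private Limited','Limited', 'Pvt', 'Pvt.', 'Private']
--     # Split the text into words
--     words = text.split()
--
--     # Find the indices of the specified words (case-insensitive)
--     indices_to_remove = set()
--     for word_to_remove in specified_words:
--         for i, word in enumerate(words):
--             if word.lower() == word_to_remove.lower():
--                 indices_to_remove.add(i)
--                 break
--
--     # If specified words are found, remove all words from those indices onward
--     if indices_to_remove:
--         min_index = min(indices_to_remove)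
--         words = words[:min_index]
--
--     # Join the remaining words back into a string
--     result = ' '.join(words)
--
--     return result
-- ===== SOURCE B (Python) =====
-- def clean_customer_name(text):
--     suffixes = {'private limited', 'limited', 'pvt', 'pvt.', 'private'}
--     kept = []
--     for word in text.split():
--         if word.lower() in suffixes:
--             break
--         kept.append(word)
--     return ' '.join(kept)
-- ===== Notes on version B (the rewrite author's own statement) =====
-- stated objective: simpler
-- what changed: A scans the word list once per suffix target, collects each first match index in a set and truncates at the minimum; B does a single forward pass that keeps words until the first word whose lowercase form is a corporate suffix.
import Mathlib
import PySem

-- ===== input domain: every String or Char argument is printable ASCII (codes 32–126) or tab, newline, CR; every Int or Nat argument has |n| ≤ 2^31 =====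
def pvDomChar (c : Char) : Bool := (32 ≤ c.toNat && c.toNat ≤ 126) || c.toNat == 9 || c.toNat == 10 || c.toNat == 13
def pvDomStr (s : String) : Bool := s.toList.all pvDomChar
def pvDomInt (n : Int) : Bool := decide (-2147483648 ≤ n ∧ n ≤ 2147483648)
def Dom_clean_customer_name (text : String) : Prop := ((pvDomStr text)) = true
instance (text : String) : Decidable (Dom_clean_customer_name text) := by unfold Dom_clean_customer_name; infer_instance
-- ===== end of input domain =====

-- B replaces A's nested target×words scan plus min-of-collected-indices by a single
-- recursive pass that keeps words until the first corporate-suffix word (objective: simpler).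


-- ===== PORT A =====
-- specified_words = ['Private Limited','Limited', 'Pvt', 'Pvt.', 'Private']
def pySpecifiedWords : List (List Char) :=
  ["Private Limited".toList, "Limited".toList, "Pvt".toList, "Pvt.".toList, "Private".toList]

-- the inner 'for i, word in enumerate(words): if word.lower() == word_to_remove.lower(): add i; break'
def aFindBreak : List (Int × List Char) → List Char → PySem.Set Int → PySem.Set Int
  | [], _, s => s
  | (i, w) :: rest, t, s =>
    if PySem.Chars.lower w == PySem.Chars.lower t then PySem.Set.add s i
    else aFindBreak rest t s

def clean_customer_name (text : String) : String :=
  let words := PySem.Chars.split₀ text.toList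
  let indices := pySpecifiedWords.foldl
      (fun s t => aFindBreak (PySem.List.enumerate words) t s) PySem.Set.empty
  let words' :=
    if indices.isEmpty then words
    else
      match PySem.List.min? indices id with
      | some m => PySem.List.slice words none (some m)   -- words[:min_index]
      | none => words                                     -- unreachable: indices nonempty
  String.ofList (PySem.Chars.join [' '] words')

-- ===== PORT B =====
def altSuffixes : PySem.Set (List Char) :=
  PySem.Set.ofList
    ["private limited".toList, "limited".toList, "pvt".toList, "pvt.".toList, "private".toList]

-- keep(ws): words before the first one whose lowercase form is a corporate suffix
def altKeep : List (List Char) → List (List Char)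
  | [] => []
  | w :: rest =>
    if PySem.Set.contains altSuffixes (PySem.Chars.lower w) then []
    else w :: altKeep rest

def clean_customer_name_alt (text : String) : String :=
  String.ofList (PySem.Chars.join [' '] (altKeep (PySem.Chars.split₀ text.toList)))

-- ===== PRECONDITION & SPEC =====
def Spec_clean_customer_name (text : String) (out : String) : Prop := out = clean_customer_name_alt text
instance (text : String) (out : String) : Decidable (Spec_clean_customer_name text out) := by unfold Spec_clean_customer_name; infer_instance

-- ===== CLAIM (what is proved, stated in full; the proofs are below) =====
def Claim_equal_clean_customer_name : Prop := ∀ (text : String), Dom_clean_customer_name text → Spec_clean_customer_name text (clean_customer_name text)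

-- ===== LEMMAS AND PROOFS =====

-- the combined match predicate of B
def pvQ (w : List Char) : Bool := PySem.Set.contains altSuffixes (PySem.Chars.lower w)

-- B's match predicate holds exactly when some of A's target words matches (case-insensitively)
theorem pvQ_iff (w : List Char) :
    pvQ w = true ↔ ∃ t ∈ pySpecifiedWords, PySem.Chars.lower w = PySem.Chars.lower t := by
  simp only [pvQ, PySem.Set.contains_iff, altSuffixes, PySem.Set.mem_ofList, pySpecifiedWords]
  simp [List.mem_cons]
  tauto

theorem altKeep_eq_takeWhile (ws : List (List Char)) :
    altKeep ws = ws.takeWhile (fun w => !pvQ w) := by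
  induction ws with
  | nil => rfl
  | cons w rest ih =>
    by_cases h : PySem.Chars.lower w ∈ altSuffixes
    · simp [altKeep, pvQ, h]
    · simp [altKeep, pvQ, h, ih]

theorem aFindBreak_eq (t : List Char) (ws : List (List Char)) (st : Int) (s : PySem.Set Int) :
    aFindBreak (PySem.List.enumerate ws st) t s =
      match List.findIdx? (fun w => PySem.Chars.lower w == PySem.Chars.lower t) ws with
      | some k => PySem.Set.add s (st + (k : Int))
      | none => s := by
  induction ws generalizing st with
  | nil => simp [PySem.List.enumerate_nil, aFindBreak]
  | cons w rest ih =>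
    rw [PySem.List.enumerate_cons, List.findIdx?_cons]
    by_cases h : (PySem.Chars.lower w == PySem.Chars.lower t) = true
    · simp [aFindBreak, h]
    · simp only [aFindBreak, h, Bool.false_eq_true, if_false]
      rw [ih (st + 1)]
      cases List.findIdx? (fun w => PySem.Chars.lower w == PySem.Chars.lower t) rest with
      | none => simp
      | some k =>
        simp only [Option.map_some]
        congr 1
        push_cast
        ring

theorem mem_indices (ws : List (List Char)) (ts : List (List Char)) (s0 : PySem.Set Int) (x : Int) :
    x ∈ ts.foldl (fun s t => aFindBreak (PySem.List.enumerate ws) t s) s0 ↔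
      x ∈ s0 ∨ ∃ t ∈ ts, ∃ k : Nat,
        List.findIdx? (fun w => PySem.Chars.lower w == PySem.Chars.lower t) ws = some k ∧ x = (k : Int) := by
  induction ts generalizing s0 with
  | nil => simp
  | cons t ts ih =>
    rw [List.foldl_cons, ih, aFindBreak_eq t ws 0 s0]
    cases hf : List.findIdx? (fun w => PySem.Chars.lower w == PySem.Chars.lower t) ws with
    | none =>
      simp only [List.mem_cons]
      constructor
      · rintro (hx | ⟨t', ht', k', hk', hxk⟩)
        · exact Or.inl hx
        · exact Or.inr ⟨t', Or.inr ht', k', hk', hxk⟩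
      · rintro (hx | ⟨t', (rfl | ht'), k, hk, hxk⟩)
        · exact Or.inl hx
        · rw [hf] at hk; cases hk
        · exact Or.inr ⟨t', ht', k, hk, hxk⟩
    | some k =>
      simp only [PySem.Set.mem_add, List.mem_cons, zero_add]
      constructor
      · rintro ((hx | hxk) | ⟨t', ht', k', hk', hxk⟩)
        · exact Or.inl hx
        · exact Or.inr ⟨t, Or.inl rfl, k, hf, hxk⟩
        · exact Or.inr ⟨t', Or.inr ht', k', hk', hxk⟩
      · rintro (hx | ⟨t', (rfl | ht'), k', hk', hxk⟩)
        · exact Or.inl (Or.inl hx)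
        · rw [hf] at hk'; cases hk'; exact Or.inl (Or.inr hxk)
        · exact Or.inr ⟨t', ht', k', hk', hxk⟩

theorem pv_findIdx_le (p : List Char → Bool) (ws : List (List Char)) (j : Nat)
    (hj : j < ws.length) (h : p ws[j] = true) : List.findIdx p ws ≤ j := by
  by_contra hc
  exact absurd h (by simpa using List.not_of_lt_findIdx (p := p) (by omega))

theorem take_findIdx?_eq_takeWhile (p : List Char → Bool) (ws : List (List Char)) :
    (match List.findIdx? p ws with | some n => ws.take n | none => ws)
      = ws.takeWhile (fun w => !p w) := by
  induction ws with
  | nil => rfl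
  | cons w rest ih =>
    rw [List.findIdx?_cons, List.takeWhile_cons]
    by_cases h : p w = true
    · simp [h]
    · cases hf : List.findIdx? p rest with
      | none =>
        rw [hf] at ih
        simp [h, ← ih]
      | some n =>
        rw [hf] at ih
        simp [h, List.take_succ_cons, ← ih]

theorem pv_main (ws : List (List Char)) :
    (if (pySpecifiedWords.foldl
          (fun s t => aFindBreak (PySem.List.enumerate ws) t s) PySem.Set.empty).isEmpty then ws
     else
       match PySem.List.min? (pySpecifiedWords.foldl
          (fun s t => aFindBreak (PySem.List.enumerate ws) t s) PySem.Set.empty) id with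
       | some m => PySem.List.slice ws none (some m)
       | none => ws)
    = altKeep ws := by
  set I := pySpecifiedWords.foldl
      (fun s t => aFindBreak (PySem.List.enumerate ws) t s) PySem.Set.empty with hI
  rw [altKeep_eq_takeWhile, ← take_findIdx?_eq_takeWhile pvQ ws]
  cases hF : List.findIdx? pvQ ws with
  | none =>
    have hall : ∀ w ∈ ws, pvQ w = false := List.findIdx?_eq_none_iff.mp hF
    have hempty : I = [] := by
      refine List.eq_nil_iff_forall_not_mem.mpr ?_
      intro x hx
      rw [hI] at hx
      rcases (mem_indices ws pySpecifiedWords PySem.Set.empty x).mp hx with hx0 | ⟨t, ht, k, hk, rfl⟩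
      · simp [PySem.Set.empty] at hx0
      · obtain ⟨hlt, hfi⟩ := List.findIdx?_eq_some_iff_findIdx_eq.mp hk
        have hpt := List.findIdx_getElem (p := fun w => PySem.Chars.lower w == PySem.Chars.lower t)
          (xs := ws) (w := by omega)
        simp only [hfi] at hpt
        have hq : pvQ ws[k] = true := (pvQ_iff _).mpr ⟨t, ht, by simpa using hpt⟩
        have := hall ws[k] (List.getElem_mem hlt)
        simp [this] at hq
    simp [hempty]
  | some n =>
    obtain ⟨hn, hfi⟩ := List.findIdx?_eq_some_iff_findIdx_eq.mp hF
    have hqn : pvQ ws[n] = true := by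
      have := List.findIdx_getElem (p := pvQ) (xs := ws) (w := by omega)
      simpa only [hfi] using this
    have hmin : ∀ j, j < ws.length → ∀ hj : j < ws.length, pvQ ws[j] = true → n ≤ j := by
      intro j _ hj hq
      have := pv_findIdx_le pvQ ws j hj hq
      omega
    have hnI : (n : Int) ∈ I := by
      rcases (pvQ_iff _).mp hqn with ⟨t, ht, hlow⟩
      have hsome : List.findIdx? (fun w => PySem.Chars.lower w == PySem.Chars.lower t) ws ≠ none := by
        intro hnone
        have := List.findIdx?_eq_none_iff.mp hnone ws[n] (List.getElem_mem hn)
        simp [hlow] at this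
      obtain ⟨k, hk⟩ := Option.ne_none_iff_exists'.mp hsome
      obtain ⟨hklt, hkfi⟩ := List.findIdx?_eq_some_iff_findIdx_eq.mp hk
      have hptk := List.findIdx_getElem (p := fun w => PySem.Chars.lower w == PySem.Chars.lower t)
        (xs := ws) (w := by omega)
      simp only [hkfi] at hptk
      have hkq : pvQ ws[k] = true := (pvQ_iff _).mpr ⟨t, ht, by simpa using hptk⟩
      have h1 : n ≤ k := hmin k hklt hklt hkq
      have h2 : k ≤ n := by
        have := pv_findIdx_le (fun w => PySem.Chars.lower w == PySem.Chars.lower t) ws n hn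
          (by simp [hlow])
        omega
      have hkn : k = n := le_antisymm h2 h1
      subst hkn
      rw [hI]
      exact (mem_indices ws pySpecifiedWords PySem.Set.empty (k : Int)).mpr
        (Or.inr ⟨t, ht, k, hk, rfl⟩)
    have hIne : I.isEmpty = false := by
      have : I ≠ [] := by intro h; rw [h] at hnI; cases hnI
      simpa [List.isEmpty_iff] using this
    rw [if_neg (by simp [hIne])]
    cases hm : PySem.List.min? I id with
    | none =>
      have := (PySem.List.min?_eq_none_iff I id).mp hm
      rw [this] at hnI; cases hnI
    | some m =>
      have hmI : m ∈ I := PySem.List.min?_mem hm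
      have hmn : m ≤ (n : Int) := by simpa using PySem.List.min?_isMin hm (n : Int) hnI
      have hnm : (n : Int) ≤ m := by
        rw [hI] at hmI
        rcases (mem_indices ws pySpecifiedWords PySem.Set.empty m).mp hmI with hx0 | ⟨t, ht, k, hk, rfl⟩
        · simp [PySem.Set.empty] at hx0
        · obtain ⟨hklt, hkfi⟩ := List.findIdx?_eq_some_iff_findIdx_eq.mp hk
          have hptk := List.findIdx_getElem (p := fun w => PySem.Chars.lower w == PySem.Chars.lower t)
            (xs := ws) (w := by omega)
          simp only [hkfi] at hptk
          have hkq : pvQ ws[k] = true := (pvQ_iff _).mpr ⟨t, ht, by simpa using hptk⟩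
          have := hmin k hklt hklt hkq
          exact_mod_cast this
      have hmeq : m = (n : Int) := le_antisymm hmn hnm
      subst hmeq
      show PySem.List.slice ws none (some ((n : Nat) : Int)) = List.take n ws
      rw [PySem.List.slice_to ws (Int.natCast_nonneg n)]
      simp

-- ===== VERDICT (by name: the statement is the Claim_ definition above) =====
theorem clean_customer_name_spec : Claim_equal_clean_customer_name := by
  intro text _
  show clean_customer_name text = clean_customer_name_alt text
  unfold clean_customer_name clean_customer_name_alt
  exact congrArg (fun l => String.ofList (PySem.Chars.join [' '] l))
    (pv_main (PySem.Chars.split₀ text.toList))
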